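-- pv_equiv track=rewrite | github.com/yy642/Trumps-Tweets | utils.py | twoword
-- ===== SOURCE A (Python) =====
-- def twoword(tokens):
--     """
--     INPUT:
--     tokens: a list of word
--     OUTPUT: a list of two-word combination
--     """
--     output = []
--     for j in range(len(tokens) - 1):
--         if ('http' in tokens[j] or 'http' in tokens[j + 1]):
--             continue
--         output.append(tokens[j : j + 2])
--     tokens = [' '.join(x) for x in output]
--     return tokens
-- ===== SOURCE B (Python) =====
-- def twoword(tokens):
--     # partition into maximal runs of non-http tokens, then pair within each run
--     segments = []
--     cur = []
--     for t in tokens: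
--         if 'http' in t:
--             if cur:
--                 segments.append(cur)
--             cur = []
--         else:
--             cur.append(t)
--     if cur:
--         segments.append(cur)
--     out = []
--     for seg in segments:
--         for a, b in zip(seg, seg[1:]):
--             out.append(a + ' ' + b)
--     return out
-- ===== Notes on version B (the rewrite author's own statement) =====
-- stated objective: alternative
-- what changed: Instead of scanning indices and testing both members of every adjacent pair, B first partitions the tokens into maximal runs of non-http tokens (discarding http tokens) and then emits the adjacent pairs inside each run.
import Mathlib
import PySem

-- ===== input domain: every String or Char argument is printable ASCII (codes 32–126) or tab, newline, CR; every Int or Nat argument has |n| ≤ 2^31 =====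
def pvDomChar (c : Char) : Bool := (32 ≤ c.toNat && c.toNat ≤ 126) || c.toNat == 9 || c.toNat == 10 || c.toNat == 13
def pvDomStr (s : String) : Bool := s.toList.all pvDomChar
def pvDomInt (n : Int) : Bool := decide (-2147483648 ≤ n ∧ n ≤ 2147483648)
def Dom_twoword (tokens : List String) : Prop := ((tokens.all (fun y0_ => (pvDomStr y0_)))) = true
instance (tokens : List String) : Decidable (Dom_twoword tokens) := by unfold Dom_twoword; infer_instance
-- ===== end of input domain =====

-- B partitions the tokens into maximal non-http runs and pairs inside each run (alternative decomposition of A's index scan).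


-- ===== PORT A =====
def twoword (tokens : List String) : List String :=
  let output : List (List String) :=
    (PySem.List.pyRange 0 ((tokens.length : Int) - 1) 1).foldl
      (fun output j =>
        if PySem.Str.isIn "http" (PySem.List.pyGetD tokens j "") ||
           PySem.Str.isIn "http" (PySem.List.pyGetD tokens (j + 1) "") then output
        else output ++ [PySem.List.slice tokens (some j) (some (j + 2))])
      []
  output.map (fun x => PySem.Str.join " " x)

-- ===== PORT B =====
def twoword_alt (tokens : List String) : List String :=
  let st : List (List String) × List String :=
    tokens.foldl
      (fun (st : List (List String) × List String) t =>
        if PySem.Str.isIn "http" t then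
          ((if st.2 = [] then st.1 else st.1 ++ [st.2]), [])
        else (st.1, st.2 ++ [t]))
      ([], [])
  let segments := if st.2 = [] then st.1 else st.1 ++ [st.2]
  (segments.map (fun seg => (seg.zip (seg.drop 1)).map (fun p => p.1 ++ " " ++ p.2))).flatten

-- ===== PRECONDITION & SPEC =====
def Spec_twoword (tokens : List String) (out : List String) : Prop := out = twoword_alt tokens
instance (tokens : List String) (out : List String) : Decidable (Spec_twoword tokens out) := by unfold Spec_twoword; infer_instance

-- ===== CLAIM (what is proved, stated in full; the proofs are below) =====
def Claim_equal_twoword : Prop := ∀ (tokens : List String), Dom_twoword tokens → Spec_twoword tokens (twoword tokens)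

-- ===== LEMMAS AND PROOFS =====

-- shared abbreviations for the proofs
def pvOk (t : String) : Bool := PySem.Str.isIn "http" t

def pvPairs (seg : List String) : List String :=
  (seg.zip (seg.drop 1)).map (fun p => p.1 ++ " " ++ p.2)

def pvEmit (segs : List (List String)) : List String :=
  (segs.map pvPairs).flatten

-- canonical recursion both ports are reduced to
def pvF : List String → List String
  | a :: b :: r => (if pvOk a || pvOk b then [] else [a ++ " " ++ b]) ++ pvF (b :: r)
  | _ => []

-- continuation of B's fold: current run `cur`, remaining tokens
def pvRest : List String → List String → List String
  | cur, [] => pvPairs cur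
  | cur, t :: ts => if pvOk t then pvPairs cur ++ pvRest [] ts else pvRest (cur ++ [t]) ts

theorem pvJoin_two (a b : String) : PySem.Str.join " " [a, b] = a ++ " " ++ b := by
  apply String.toList_injective
  simp [PySem.Str.join, PySem.Chars.join, List.intercalate]

theorem pvPairs_cons_cons (a b : String) (r : List String) :
    pvPairs (a :: b :: r) = (a ++ " " ++ b) :: pvPairs (b :: r) := by
  simp [pvPairs]

theorem pvRest_cons_cons (ts : List String) (cur : List String) (a b : String) :
    pvRest (a :: b :: cur) ts = (a ++ " " ++ b) :: pvRest (b :: cur) ts := by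
  induction ts generalizing cur with
  | nil => simp [pvRest, pvPairs_cons_cons]
  | cons t ts ih =>
    by_cases h : pvOk t = true
    · simp [pvRest, h, pvPairs_cons_cons]
    · simp only [Bool.not_eq_true] at h
      simp only [pvRest, h, Bool.false_eq_true, if_false]
      have : a :: b :: cur ++ [t] = a :: b :: (cur ++ [t]) := by simp
      rw [this, ih]
      rfl

theorem pvF_skip (u : String) (ts : List String) (h : pvOk u = true) : pvF (u :: ts) = pvF ts := by
  cases ts with
  | nil => simp [pvF]
  | cons t ts => simp [pvF, h]

theorem pvRest_eq_pvF (ts : List String) :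
    pvRest [] ts = pvF ts ∧ ∀ l, pvOk l = false → pvRest [l] ts = pvF (l :: ts) := by
  induction ts with
  | nil =>
    refine ⟨rfl, fun l _ => ?_⟩
    simp [pvRest, pvPairs, pvF]
  | cons t ts ih =>
    constructor
    · by_cases h : pvOk t = true
      · simp only [pvRest, h, if_true, pvPairs, List.zip_nil_left, List.map_nil,
          List.nil_append]
        rw [ih.1, pvF_skip t ts h]
      · simp only [Bool.not_eq_true] at h
        simp only [pvRest, h, Bool.false_eq_true, if_false, List.nil_append]
        exact ih.2 t h
    · intro l hl
      by_cases h : pvOk t = true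
      · simp only [pvRest, h, if_true]
        have h1 : pvPairs [l] = [] := by simp [pvPairs]
        rw [h1, ih.1, List.nil_append]
        simp [pvF, h, pvF_skip t ts h]
      · simp only [Bool.not_eq_true] at h
        simp only [pvRest, h, Bool.false_eq_true, if_false, List.cons_append, List.nil_append]
        rw [pvRest_cons_cons ts [] l t, ih.2 t h]
        simp [pvF, hl, h]

theorem pvEmit_append_run (segs : List (List String)) (cur : List String) :
    pvEmit (if cur = [] then segs else segs ++ [cur]) = pvEmit segs ++ pvPairs cur := by
  by_cases h : cur = []
  · simp [h, pvPairs]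
  · simp [h, pvEmit]

theorem pvFoldB (ts : List String) (segs : List (List String)) (cur : List String) :
    (fun (st : List (List String) × List String) =>
        pvEmit (if st.2 = [] then st.1 else st.1 ++ [st.2]))
      (ts.foldl
        (fun (st : List (List String) × List String) t =>
          if PySem.Str.isIn "http" t then
            ((if st.2 = [] then st.1 else st.1 ++ [st.2]), [])
          else (st.1, st.2 ++ [t]))
        (segs, cur)) = pvEmit segs ++ pvRest cur ts := by
  induction ts generalizing segs cur with
  | nil => simpa using pvEmit_append_run segs cur
  | cons t ts ih =>
    cases h : pvOk t with
    | true =>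
      have h' : PySem.Str.isIn "http" t = true := h
      simp only [List.foldl_cons, h', if_true, ih, pvRest, h, pvEmit_append_run,
        List.append_assoc]
    | false =>
      have h' : PySem.Str.isIn "http" t = false := h
      simp only [List.foldl_cons, h', Bool.false_eq_true, if_false, ih, pvRest, h]

theorem twoword_alt_eq_pvF (tokens : List String) : twoword_alt tokens = pvF tokens := by
  have h := pvFoldB tokens [] []
  simp only [pvEmit, List.map_nil, List.flatten_nil, List.nil_append] at h
  exact h.trans (pvRest_eq_pvF tokens).1

theorem twoword_idx (tokens : List String) :
    twoword tokens =
      (((List.range (tokens.length - 1)).filter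
          (fun k => !(pvOk (tokens[k]?.getD "") || pvOk (tokens[k + 1]?.getD "")))).map
        (fun k => PySem.Str.join " " ((tokens.drop k).take 2))) := by
  unfold twoword
  rw [show (fun (output : List (List String)) j =>
        if PySem.Str.isIn "http" (PySem.List.pyGetD tokens j "") ||
           PySem.Str.isIn "http" (PySem.List.pyGetD tokens (j + 1) "") then output
        else output ++ [PySem.List.slice tokens (some j) (some (j + 2))]) =
      (fun (output : List (List String)) j =>
        if !(PySem.Str.isIn "http" (PySem.List.pyGetD tokens j "") ||
           PySem.Str.isIn "http" (PySem.List.pyGetD tokens (j + 1) "")) then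
          output ++ [PySem.List.slice tokens (some j) (some (j + 2))] else output) from by
    funext o j
    cases hc : (PySem.Str.isIn "http" (PySem.List.pyGetD tokens j "") ||
           PySem.Str.isIn "http" (PySem.List.pyGetD tokens (j + 1) "")) <;>
      simp only [Bool.not_false, Bool.not_true, if_false, if_true, Bool.false_eq_true]]
  rw [PySem.List.foldl_append_if]
  rw [PySem.List.pyRange_one]
  simp only [List.filter_map, List.map_map, List.nil_append]
  have hn : (((tokens.length : Int) - 1) - 0).toNat = tokens.length - 1 := by omega
  rw [hn]
  have hfil : List.filter
      ((fun j => !(PySem.Str.isIn "http" (PySem.List.pyGetD tokens j "") ||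
          PySem.Str.isIn "http" (PySem.List.pyGetD tokens (j + 1) ""))) ∘ (fun (k : Nat) => 0 + (k : Int)))
      (List.range (tokens.length - 1)) =
      List.filter (fun k => !(pvOk (tokens[k]?.getD "") || pvOk (tokens[k + 1]?.getD "")))
      (List.range (tokens.length - 1)) := by
    apply List.filter_congr
    intro k hk
    have h1 : ((k : Int)) + 1 = ((k + 1 : Nat) : Int) := by push_cast; ring
    simp only [Function.comp, zero_add, h1, PySem.List.pyGetD_natCast, pvOk,
      List.getD_eq_getElem?_getD]
  rw [hfil]
  apply List.map_congr_left
  intro k hk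
  simp only [Function.comp, zero_add]
  rw [show ((k : Int) + 2) = (k : Int) + ((2 : Nat) : Int) by push_cast; ring]
  rw [PySem.List.slice_natCast_add]

theorem pvIdx_eq_pvF (tokens : List String) :
    (((List.range (tokens.length - 1)).filter
        (fun k => !(pvOk (tokens[k]?.getD "") || pvOk (tokens[k + 1]?.getD "")))).map
      (fun k => PySem.Str.join " " ((tokens.drop k).take 2))) = pvF tokens := by
  induction tokens with
  | nil => simp [pvF]
  | cons a tl ih =>
    cases tl with
    | nil => simp [pvF]
    | cons b r =>
      cases ha : pvOk a <;> cases hb : pvOk b <;>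
        simp [List.range_succ_eq_map, List.filter_map, List.map_map, ha, hb, pvF,
          Function.comp_def, pvJoin_two, Nat.succ_eq_add_one] at ih ⊢ <;>
        simp [ih]

theorem twoword_eq_pvF (tokens : List String) : twoword tokens = pvF tokens := by
  rw [twoword_idx, pvIdx_eq_pvF]

-- ===== VERDICT (by name: the statement is the Claim_ definition above) =====
theorem twoword_spec : Claim_equal_twoword := by
  intro tokens _
  unfold Spec_twoword
  rw [twoword_eq_pvF, twoword_alt_eq_pvF]
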